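-- pv_equiv track=rewrite | github.com/mumuvrf/Academia-Python | Aula 9/matematico_ilha_deserta.py | valida_exp
-- ===== SOURCE A (Python) =====
-- def valida_exp(expressao):
--     soma_esq = 0
--     soma_dir = 0
--     num_atual = 0
--     igual = False
--     multiplica = False
--     for caracter in expressao:
--         if caracter == 'I': num_atual += 1
--         elif caracter in ['*', '+', '=']:
--             if multiplica:
--                 if igual: soma_dir *= num_atual
--                 else: soma_esq *= num_atual
--             else:
--                 if igual: soma_dir += num_atual
--                 else: soma_esq += num_atual
--             num_atual = 0
--
--             if caracter == '*': multiplica = True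
--             elif caracter == '+': multiplica = False
--             elif caracter == '=':
--                 multiplica = False
--                 igual = True
--
--     if not igual: return False
--     else:
--         if multiplica: soma_dir *= num_atual
--         else: soma_dir += num_atual
--
--     return soma_esq == soma_dir
-- ===== SOURCE B (Python) =====
-- def _fold(counts, ops):
--     # counts is non-empty wherever called; left-to-right, no precedence
--     acc = counts[0]
--     for op, c in zip(ops, counts[1:]):
--         acc = acc * c if op == '*' else acc + c
--     return acc
--
-- def valida_exp(expressao):
--     # pass 1: tokenize into segment counts and the operators between them
--     counts, ops, n = [], [], 0
--     for ch in expressao: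
--         if ch == 'I':
--             n += 1
--         elif ch in '*+=':
--             counts.append(n)
--             ops.append(ch)
--             n = 0
--     counts.append(n)
--     # pass 2: split on the first '=' and fold each side (later '=' adds, like '+')
--     if '=' not in ops:
--         return False
--     k = ops.index('=')
--     return _fold(counts[:k + 1], ops[:k]) == _fold(counts[k + 1:], ops[k + 1:])
-- ===== Notes on version B (the rewrite author's own statement) =====
-- stated objective: alternative
-- what changed: A judges the expression in one scan with five mutable state variables (two running sums, a pending count and two flags); B first tokenizes the string into segment counts and operator lists, then splits at the first '=' and folds each side left-to-right, so parsing and evaluation are separate phases.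
import Mathlib
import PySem

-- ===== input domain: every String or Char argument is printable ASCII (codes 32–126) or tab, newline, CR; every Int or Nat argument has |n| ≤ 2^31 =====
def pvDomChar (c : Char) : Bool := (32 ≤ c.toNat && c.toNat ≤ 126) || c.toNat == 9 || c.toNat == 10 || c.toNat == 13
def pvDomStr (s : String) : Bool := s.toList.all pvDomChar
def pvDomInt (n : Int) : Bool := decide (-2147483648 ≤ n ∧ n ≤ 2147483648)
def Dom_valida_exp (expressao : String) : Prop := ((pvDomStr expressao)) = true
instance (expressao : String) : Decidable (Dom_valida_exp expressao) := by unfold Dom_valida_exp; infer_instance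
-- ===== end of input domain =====

-- B re-implements A as two phases (tokenize into counts/operators, then split at the
-- first '=' and fold each side); same cost, different decomposition ("alternative").

-- ===== PORT A =====
def pvStepA (st : Int × Int × Int × Bool × Bool) (c : Char) : Int × Int × Int × Bool × Bool :=
  let (se, sd, n, ig, mult) := st
  if c = 'I' then (se, sd, n + 1, ig, mult)
  else if c = '*' ∨ c = '+' ∨ c = '=' then
    let p : Int × Int :=
      if mult then (if ig then (se, sd * n) else (se * n, sd))
      else (if ig then (se, sd + n) else (se + n, sd))
    if c = '*' then (p.1, p.2, 0, ig, true)
    else if c = '+' then (p.1, p.2, 0, ig, false)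
    else (p.1, p.2, 0, true, false)
  else (se, sd, n, ig, mult)

def valida_exp (expressao : String) : Bool :=
  let st := expressao.toList.foldl pvStepA (0, 0, 0, false, false)
  let se := st.1
  let sd := st.2.1
  let n := st.2.2.1
  let ig := st.2.2.2.1
  let mult := st.2.2.2.2
  if !ig then false
  else
    let sd' := if mult then sd * n else sd + n
    se == sd'

-- ===== PORT B =====
-- _fold of Source B; the [] case is unreachable in Source B (both slices passed are non-empty)
def pvFoldSide (cs : List Int) (os : List Char) : Int :=
  match cs with
  | [] => 0
  | c :: rest => (os.zip rest).foldl (fun acc p => if p.1 = '*' then acc * p.2 else acc + p.2) c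

-- one step of Source B's tokenizing loop: state (counts, ops, current count)
def pvStepB (st : List Int × List Char × Int) (ch : Char) : List Int × List Char × Int :=
  let (cs, os, n) := st
  if ch = 'I' then (cs, os, n + 1)
  else if ch = '*' ∨ ch = '+' ∨ ch = '=' then (cs ++ [n], os ++ [ch], 0)
  else (cs, os, n)

def valida_exp_alt (expressao : String) : Bool :=
  let t := expressao.toList.foldl pvStepB ([], [], 0)
  let counts := t.1 ++ [t.2.2]
  let os := t.2.1
  match PySem.List.index? os '=' with
  | none => false
  | some k =>
      pvFoldSide (counts.take (k + 1)) (os.take k)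
        == pvFoldSide (counts.drop (k + 1)) (os.drop (k + 1))

-- ===== PRECONDITION & SPEC =====
def Spec_valida_exp (expressao : String) (out : Bool) : Prop := out = valida_exp_alt expressao
instance (expressao : String) (out : Bool) : Decidable (Spec_valida_exp expressao out) := by unfold Spec_valida_exp; infer_instance

-- ===== CLAIM (what is proved, stated in full; the proofs are below) =====
def Claim_equal_valida_exp : Prop := ∀ (expressao : String), Dom_valida_exp expressao → Spec_valida_exp expressao (valida_exp expressao)

-- ===== LEMMAS AND PROOFS =====

-- abstraction from B's tokenizer state to A's scan state
def pvMult (os : List Char) : Bool := os.getLast? == some '*'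
def pvIg (os : List Char) : Bool := os.contains '='
def pvL (cs : List Int) (os : List Char) : Int :=
  match PySem.List.index? os '=' with
  | none => pvFoldSide cs os
  | some k => pvFoldSide (cs.take (k + 1)) (os.take k)
def pvR (cs : List Int) (os : List Char) : Int :=
  match PySem.List.index? os '=' with
  | none => 0
  | some k => pvFoldSide (cs.drop (k + 1)) (os.drop (k + 1))
def pvAbs (st : List Int × List Char × Int) : Int × Int × Int × Bool × Bool :=
  (pvL st.1 st.2.1, pvR st.1 st.2.1, st.2.2, pvIg st.2.1, pvMult st.2.1)


theorem pv_zip_trunc {α β : Type} (l1 : List α) (l2 : List β) (t : List α)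
    (h : l2.length ≤ l1.length) : (l1 ++ t).zip l2 = l1.zip l2 := by
  induction l1 generalizing l2 with
  | nil => cases l2 with
    | nil => simp
    | cons b bs => simp at h
  | cons a as ih => cases l2 with
    | nil => simp
    | cons b bs => simp_all [List.zip]

theorem pv_ops_trunc (cs : List Int) (os t : List Char)
    (h : cs.length ≤ os.length + 1) : pvFoldSide cs (os ++ t) = pvFoldSide cs os := by
  cases cs with
  | nil => rfl
  | cons c rest =>
    simp only [pvFoldSide]
    rw [pv_zip_trunc os rest t (by simp at h; omega)]

-- appending one more count folds it in with the last operator's meaning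
theorem pv_foldSide_snoc (cs : List Int) (os : List Char) (n : Int)
    (h : cs.length = os.length) :
    pvFoldSide (cs ++ [n]) os =
      (if pvMult os then pvFoldSide cs os * n else pvFoldSide cs os + n) := by
  cases cs with
  | nil =>
    have hos : os = [] := by cases os <;> simp_all
    subst hos; simp [pvFoldSide, pvMult]
  | cons c rest =>
    rcases List.eq_nil_or_concat os with h0 | ⟨os0, o, rfl⟩
    · subst h0; simp at h
    · simp only [List.concat_eq_append] at h
      have hlen : os0.length = rest.length := by
        simp [List.length_append] at h; omega
      have hz : (os0 ++ [o]).zip (rest ++ [n]) = os0.zip rest ++ [(o, n)] := by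
        rw [List.zip_append hlen]; rfl
      have hz2 : (os0 ++ [o]).zip rest = os0.zip rest :=
        pv_zip_trunc os0 rest [o] (le_of_eq hlen.symm)
      simp only [List.concat_eq_append, List.cons_append, pvFoldSide]
      rw [hz, List.foldl_append]
      simp only [List.foldl_cons, List.foldl_nil, pvMult, List.getLast?_concat, hz2]
      by_cases ho : o = '*' <;> simp [ho]

theorem pv_mult_drop (os : List Char) (k : Nat)
    (h : PySem.List.index? os '=' = some k) : pvMult (os.drop (k + 1)) = pvMult os := by
  obtain ⟨hk, hget, -⟩ := PySem.List.getElem_of_index?_eq_some h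
  by_cases hd : os.drop (k + 1) = []
  · have hlen : os.length ≤ k + 1 := by
      have := List.drop_eq_nil_iff.mp hd; omega
    have hk1 : os.length = k + 1 := by omega
    have hlast : os.getLast? = some '=' := by
      rw [List.getLast?_eq_getElem?, hk1]
      simp [List.getElem?_eq_getElem hk, hget]
    simp [pvMult, hd, hlast]
  · have hap := List.getLast?_append_of_ne_nil (os.take (k + 1)) hd
    rw [List.take_append_drop] at hap
    simp [pvMult, hap]

theorem pv_R_step (cs : List Int) (os : List Char) (n : Int) (k : Nat)
    (h : cs.length = os.length) (hk : PySem.List.index? os '=' = some k) :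
    pvFoldSide (cs.drop (k + 1) ++ [n]) (os.drop (k + 1)) =
      if pvMult os then pvFoldSide (cs.drop (k + 1)) (os.drop (k + 1)) * n
      else pvFoldSide (cs.drop (k + 1)) (os.drop (k + 1)) + n := by
  rw [pv_foldSide_snoc _ _ _ (by simp [h]), pv_mult_drop os k hk]

-- the two "new left/right value" facts for the operator step
theorem pv_L_new (cs : List Int) (os : List Char) (n : Int) (c : Char)
    (h : cs.length = os.length) (hmem : '=' ∉ os) :
    pvL (cs ++ [n]) (os ++ [c]) =
      (if pvMult os then pvFoldSide cs os * n else pvFoldSide cs os + n) := by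
  by_cases hc : c = '='
  · subst hc
    have hidx : PySem.List.index? (os ++ ['=']) '=' = some os.length :=
      PySem.List.index?_append_singleton_self os '=' hmem
    have ht1 : (cs ++ [n]).take (os.length + 1) = cs ++ [n] :=
      List.take_of_length_le (by simp [h])
    have ht2 : (os ++ ['=']).take os.length = os := by
      rw [List.take_append_of_le_length (le_refl _), List.take_length]
    rw [pvL, hidx]
    dsimp only
    simp only [ht1, ht2]
    exact pv_foldSide_snoc cs os n h
  · have hidx : PySem.List.index? (os ++ [c]) '=' = none := by
      rw [PySem.List.index?_eq_none_iff]
      simp [hmem, Ne.symm hc]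
    rw [pvL, hidx]
    dsimp only
    rw [pv_ops_trunc _ _ _ (by simp [h])]
    exact pv_foldSide_snoc cs os n h

theorem pv_R_new (cs : List Int) (os : List Char) (n : Int) (c : Char) (k : Nat)
    (h : cs.length = os.length) (hk : PySem.List.index? os '=' = some k) :
    pvR (cs ++ [n]) (os ++ [c]) =
      (if pvMult os then pvR cs os * n else pvR cs os + n) := by
  obtain ⟨hklt, -, -⟩ := PySem.List.getElem_of_index?_eq_some hk
  have hidx : PySem.List.index? (os ++ [c]) '=' = some k := by
    rw [PySem.List.index?_append_of_mem]
    · exact hk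
    · exact (PySem.List.index?_isSome_iff os '=').mp (by rw [hk]; rfl)
  rw [pvR, hidx, pvR, hk]
  dsimp only
  rw [List.drop_append_of_le_length (by omega : k + 1 ≤ cs.length),
      List.drop_append_of_le_length (by omega : k + 1 ≤ os.length)]
  rw [pv_ops_trunc _ _ _ (by simp; omega)]
  exact pv_R_step cs os n k h hk

theorem pv_step (st : List Int × List Char × Int) (c : Char)
    (h : st.1.length = st.2.1.length) :
    pvStepA (pvAbs st) c = pvAbs (pvStepB st c) := by
  obtain ⟨cs, os, n⟩ := st
  simp only at h
  by_cases hI : c = 'I'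
  · subst hI; simp [pvStepA, pvStepB, pvAbs]
  by_cases hop : c = '*' ∨ c = '+' ∨ c = '='
  case neg => simp [pvStepA, pvStepB, pvAbs, hI, hop]
  -- operator step
  have hmult' : pvMult (os ++ [c]) = (c == '*') := by
    simp [pvMult]
  have hig' : pvIg (os ++ [c]) = (pvIg os || decide (c = '=')) := by
    simp [pvIg, List.contains_eq_mem, List.mem_append, Bool.or_comm, eq_comm]
  by_cases hmem : '=' ∈ os
  · -- already past '=': left side frozen, right side absorbs n
    have hsome := (PySem.List.index?_isSome_iff os '=').mpr hmem
    obtain ⟨k, hk⟩ := Option.isSome_iff_exists.mp hsome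
    obtain ⟨hklt, -, -⟩ := PySem.List.getElem_of_index?_eq_some hk
    have hidx : PySem.List.index? (os ++ [c]) '=' = some k := by
      rw [PySem.List.index?_append_of_mem _ hmem]; exact hk
    have hL : pvL (cs ++ [n]) (os ++ [c]) = pvL cs os := by
      rw [pvL, hidx, pvL, hk]
      dsimp only
      rw [
        List.take_append_of_le_length (by omega : k + 1 ≤ cs.length),
        List.take_append_of_le_length (by omega : k ≤ os.length)]
    have hR := pv_R_new cs os n c k h hk
    have hig : pvIg os = true := by simp [pvIg, List.contains_eq_mem, hmem]
    simp only [pvStepB, pvAbs, hI, hop, if_false, if_true]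
    rcases hop with hc | hc | hc <;> subst hc <;>
      simp [pvStepA, hig, hig', hmult', hL, hR] <;>
      by_cases hm : pvMult os <;> simp [hm]
  · -- before any '=': left side absorbs n
    have hidx0 : PySem.List.index? os '=' = none := (PySem.List.index?_eq_none_iff os '=').mpr hmem
    have hL0 : pvL cs os = pvFoldSide cs os := by rw [pvL, hidx0]
    have hR0 : pvR cs os = 0 := by rw [pvR, hidx0]
    have hig : pvIg os = false := by simp [pvIg, List.contains_eq_mem, hmem]
    have hL := pv_L_new cs os n c h hmem
    have hRnew : pvR (cs ++ [n]) (os ++ [c]) = 0 := by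
      by_cases hc : c = '='
      · subst hc
        rw [pvR, PySem.List.index?_append_singleton_self os '=' hmem]
        dsimp only
        have : (cs ++ [n]).drop (os.length + 1) = [] := by
          apply List.drop_eq_nil_iff.mpr; simp [h]
        rw [this]; rfl
      · have : PySem.List.index? (os ++ [c]) '=' = none := by
          rw [PySem.List.index?_eq_none_iff]
          simp [hmem, Ne.symm hc]
        rw [pvR, this]
    simp only [pvStepB, pvAbs, hI, hop, if_false, if_true]
    rcases hop with hc | hc | hc <;> subst hc <;>
      simp [pvStepA, hig, hig', hmult', hL, hL0, hR0, hRnew] <;>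
      by_cases hm : pvMult os <;> simp [hm]

theorem pv_invariant (l : List Char) (st : List Int × List Char × Int)
    (h : st.1.length = st.2.1.length) :
    l.foldl pvStepA (pvAbs st) = pvAbs (l.foldl pvStepB st) := by
  induction l generalizing st with
  | nil => rfl
  | cons c cs ih =>
    have hlen : (pvStepB st c).1.length = (pvStepB st c).2.1.length := by
      obtain ⟨a, b, n⟩ := st
      simp only at h
      by_cases h1 : c = 'I' <;> by_cases h2 : c = '*' ∨ c = '+' ∨ c = '=' <;>
        simp [pvStepB, h1, h2, h]
    simp only [List.foldl_cons, pv_step st c h, ih _ hlen]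

theorem pv_lenpres (l : List Char) (st : List Int × List Char × Int)
    (h : st.1.length = st.2.1.length) :
    (l.foldl pvStepB st).1.length = (l.foldl pvStepB st).2.1.length := by
  induction l generalizing st with
  | nil => exact h
  | cons c cs ih =>
    apply ih
    obtain ⟨a, b, n⟩ := st
    simp only at h
    by_cases h1 : c = 'I' <;> by_cases h2 : c = '*' ∨ c = '+' ∨ c = '=' <;>
      simp [pvStepB, h1, h2, h]

theorem pv_final (cs : List Int) (os : List Char) (n : Int)
    (h : cs.length = os.length) :
    (if !(pvAbs (cs, os, n)).2.2.2.1 then false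
     else ((pvAbs (cs, os, n)).1 ==
       (if (pvAbs (cs, os, n)).2.2.2.2 then (pvAbs (cs, os, n)).2.1 * (pvAbs (cs, os, n)).2.2.1
        else (pvAbs (cs, os, n)).2.1 + (pvAbs (cs, os, n)).2.2.1))) =
    (match PySem.List.index? os '=' with
     | none => false
     | some k =>
         pvFoldSide ((cs ++ [n]).take (k + 1)) (os.take k)
           == pvFoldSide ((cs ++ [n]).drop (k + 1)) (os.drop (k + 1))) := by
  rcases hidx : PySem.List.index? os '=' with _ | k
  · have hmem : '=' ∉ os := (PySem.List.index?_eq_none_iff os '=').mp hidx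
    have hig : pvIg os = false := by simp [pvIg, List.contains_eq_mem, hmem]
    simp [pvAbs, hig]
  · obtain ⟨hklt, -, -⟩ := PySem.List.getElem_of_index?_eq_some hidx
    have hmem : '=' ∈ os := (PySem.List.index?_isSome_iff os '=').mp (by rw [hidx]; rfl)
    have hig : pvIg os = true := by simp [pvIg, List.contains_eq_mem, hmem]
    have htake : (cs ++ [n]).take (k + 1) = cs.take (k + 1) :=
      List.take_append_of_le_length (by omega)
    have hdrop : (cs ++ [n]).drop (k + 1) = cs.drop (k + 1) ++ [n] :=
      List.drop_append_of_le_length (by omega)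
    have hR := pv_R_step cs os n k h hidx
    simp only [pvAbs, pvL, pvR, hidx, hig, htake, hdrop, hR, Bool.not_true, if_false,
      Bool.false_eq_true]

-- ===== VERDICT (by name: the statement is the Claim_ definition above) =====
theorem valida_exp_spec : Claim_equal_valida_exp := by
  intro s _
  unfold Spec_valida_exp valida_exp valida_exp_alt
  have h0 : ((0 : Int), (0 : Int), (0 : Int), false, false) = pvAbs ([], [], 0) := rfl
  rw [h0, pv_invariant s.toList ([], [], 0) rfl]
  have hlen := pv_lenpres s.toList ([], [], 0) rfl
  generalize hgen : s.toList.foldl pvStepB ([], [], 0) = t at hlen ⊢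
  obtain ⟨cs, os, n⟩ := t
  simpa using pv_final cs os n hlen
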